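-- pv_equiv track=rewrite | github.com/zsctty/Qiskit-For-QRMW-Model | QuantumImageProcess.py | getDecomposeArray
-- ===== SOURCE A (Python) =====
-- def getDecomposeArray(inputbitlength):
--     # 对ncnot控制序列进行分解，以4cnot为基础门，通过使用额外存储量子比特进行分解
--     index = inputbitlength
--     contorlArrayIndex = 0
--     bitlength = inputbitlength
--     CNNotGateArray = []
--     while(bitlength >= 4):
--         restLength = bitlength % 4
--         implementLength = int(bitlength / 4)
--         for i in range(implementLength):
--             CNNotGateArray.append([4,
--                                    contorlArrayIndex*4,
--                                    contorlArrayIndex*4 + 1,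
--                                    contorlArrayIndex*4 + 2,
--                                    contorlArrayIndex*4 + 3,
--                                    index])
--             contorlArrayIndex += 1
--             index += 1
--         bitlength = restLength + implementLength
-- #     if bitlength == 1:
-- #         CNNotGateArray.append([1, index - 1, index])
--     if bitlength == 2:
--         CNNotGateArray.append([2, index - 2, index - 1, index])
--     elif bitlength == 3:
--         CNNotGateArray.append([3, index - 3, index - 2, index - 1, index])
--     return CNNotGateArray
-- ===== SOURCE B (Python) =====
-- def getDecomposeArray(inputbitlength):
--     # Count-then-emit: first simulate the bit-length reduction to count the
--     # total number of 4-CNOT gates, then emit them in one flat loop.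
--     b = inputbitlength
--     count = 0
--     while b >= 4:
--         q = b // 4
--         count += q
--         b = b % 4 + q
--     gates = [[4, 4 * k, 4 * k + 1, 4 * k + 2, 4 * k + 3, inputbitlength + k]
--              for k in range(count)]
--     index = inputbitlength + count
--     if b == 2:
--         gates.append([2, index - 2, index - 1, index])
--     elif b == 3:
--         gates.append([3, index - 3, index - 2, index - 1, index])
--     return gates
-- ===== Notes on version B (the rewrite author's own statement) =====
-- stated objective: alternative
-- what changed: Replaces A's interleaved while-loop with a nested gate-appending for-loop by a scalar count-phase (simulating the bitlength reduction while summing b//4) followed by one flat comprehension emitting gate k as [4,4k,4k+1,4k+2,4k+3,n+k], plus the same 2/3-bit tail.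
import Mathlib
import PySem

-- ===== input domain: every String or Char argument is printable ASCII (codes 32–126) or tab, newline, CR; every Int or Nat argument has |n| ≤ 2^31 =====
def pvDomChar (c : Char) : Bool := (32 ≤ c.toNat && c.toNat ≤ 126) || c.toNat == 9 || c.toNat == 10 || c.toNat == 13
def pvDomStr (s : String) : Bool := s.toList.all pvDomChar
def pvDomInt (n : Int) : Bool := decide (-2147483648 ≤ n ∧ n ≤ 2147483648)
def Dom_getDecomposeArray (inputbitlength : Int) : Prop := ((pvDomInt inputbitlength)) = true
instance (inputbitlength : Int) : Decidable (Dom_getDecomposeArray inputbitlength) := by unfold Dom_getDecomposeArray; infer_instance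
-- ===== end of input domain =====

-- B re-implements A as a count-phase (scalar reduction loop) followed by one flat
-- gate-emitting comprehension; same return value, objective: alternative decomposition.

-- ===== PORT A =====
-- body of A's inner 'for i in range(implementLength)' loop; state = (gates, cidx, index)
def pvAstep (s : List (List Int) × Int × Int) (_ : Int) : List (List Int) × Int × Int :=
  (s.1 ++ [[4, s.2.1 * 4, s.2.1 * 4 + 1, s.2.1 * 4 + 2, s.2.1 * 4 + 3, s.2.2]],
   s.2.1 + 1, s.2.2 + 1)

-- A's 'while bitlength >= 4' loop; returns (gates, index, final bitlength).
-- The fuel argument is only a totality guard (bitlength strictly decreases each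
-- iteration, so fuel = bitlength.toNat never runs out).
-- 'int(bitlength / 4)' is ported as floor division: exact here since bitlength ≥ 4 > 0
-- (and |input| ≤ 2^31 keeps Python's float division exact).
def pvAloop : Nat → Int → Int → Int → List (List Int) → List (List Int) × Int × Int
  | 0, b, idx, _, acc => (acc, idx, b)
  | fuel + 1, b, idx, cidx, acc =>
    if 4 ≤ b then
      let rest := PySem.Int.mod b 4
      let impl := PySem.Int.floordiv b 4
      let s := (PySem.List.pyRange 0 impl 1).foldl pvAstep (acc, cidx, idx)
      pvAloop fuel (rest + impl) s.2.2 s.2.1 s.1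
    else (acc, idx, b)

def getDecomposeArray (inputbitlength : Int) : List (List Int) :=
  let s := pvAloop inputbitlength.toNat inputbitlength inputbitlength 0 []
  let acc := s.1
  let index := s.2.1
  let bitlength := s.2.2
  if bitlength = 2 then acc ++ [[2, index - 2, index - 1, index]]
  else if bitlength = 3 then acc ++ [[3, index - 3, index - 2, index - 1, index]]
  else acc

-- ===== PORT B =====
-- B's count-phase 'while b >= 4' loop: returns (count, final b); fuel is a totality guard only
def pvBloop : Nat → Int → Int → Int × Int
  | 0, b, count => (count, b)
  | fuel + 1, b, count =>
    if 4 ≤ b then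
      pvBloop fuel (PySem.Int.mod b 4 + PySem.Int.floordiv b 4) (count + PySem.Int.floordiv b 4)
    else (count, b)

def getDecomposeArray_alt (inputbitlength : Int) : List (List Int) :=
  let s := pvBloop inputbitlength.toNat inputbitlength 0
  let count := s.1
  let b := s.2
  let gates := (PySem.List.pyRange 0 count 1).map
    (fun k => [4, 4 * k, 4 * k + 1, 4 * k + 2, 4 * k + 3, inputbitlength + k])
  let index := inputbitlength + count
  if b = 2 then gates ++ [[2, index - 2, index - 1, index]]
  else if b = 3 then gates ++ [[3, index - 3, index - 2, index - 1, index]]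
  else gates

-- ===== PRECONDITION & SPEC =====
def Spec_getDecomposeArray (inputbitlength : Int) (out : List (List Int)) : Prop := out = getDecomposeArray_alt inputbitlength
instance (inputbitlength : Int) (out : List (List Int)) : Decidable (Spec_getDecomposeArray inputbitlength out) := by unfold Spec_getDecomposeArray; infer_instance

-- ===== CLAIM (what is proved, stated in full; the proofs are below) =====
def Claim_equal_getDecomposeArray : Prop := ∀ (inputbitlength : Int), Dom_getDecomposeArray inputbitlength → Spec_getDecomposeArray inputbitlength (getDecomposeArray inputbitlength)

-- ===== LEMMAS AND PROOFS =====

-- the gate emitted at flat position k when the running counters start at c (cidx) and i (index)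
def pvGate (c i : Int) (k : Nat) : List Int :=
  [4, (c + k) * 4, (c + k) * 4 + 1, (c + k) * 4 + 2, (c + k) * 4 + 3, i + k]

lemma pvGate_succ (c i : Int) (k : Nat) : pvGate c i (k + 1) = pvGate (c + 1) (i + 1) k := by
  simp only [pvGate, List.cons.injEq, and_true, true_and]
  push_cast
  omega

-- A's inner for-loop, characterised: it appends the next L.length gates and bumps both counters
lemma pvFold_eq (L : List Int) : ∀ (acc : List (List Int)) (c i : Int),
    L.foldl pvAstep (acc, c, i) =
      (acc ++ (List.range L.length).map (pvGate c i), c + L.length, i + L.length) := by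
  induction L with
  | nil => intro acc c i; simp
  | cons x t ih =>
    intro acc c i
    simp only [List.foldl_cons, pvAstep, ih]
    refine congrArg₂ _ ?_ (by simp [Prod.ext_iff]; omega)
    rw [List.length_cons, List.range_succ_eq_map, List.map_cons, List.map_map]
    have hmm : (List.range t.length).map (pvGate c i ∘ Nat.succ)
        = (List.range t.length).map (pvGate (c + 1) (i + 1)) := by
      apply List.map_congr_left
      intro k _
      simpa using pvGate_succ c i k
    simp [pvGate, hmm]

lemma pvBloop_acc (f : Nat) : ∀ (b c : Int),
    pvBloop f b c = ((pvBloop f b 0).1 + c, (pvBloop f b 0).2) := by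
  induction f with
  | zero => intro b c; simp [pvBloop]
  | succ f ih =>
    intro b c
    by_cases h4 : 4 ≤ b
    · simp only [pvBloop, if_pos h4]
      rw [ih, ih _ (0 + PySem.Int.floordiv b 4)]
      simp [Prod.ext_iff]
      ring
    · simp [pvBloop, h4]

lemma pvBloop_stop (f : Nat) (b : Int) (h4 : ¬ 4 ≤ b) : pvBloop f b 0 = (0, b) := by
  cases f <;> simp [pvBloop, h4]

lemma pvBloop_nonneg (f : Nat) : ∀ b : Int, 0 ≤ (pvBloop f b 0).1 := by
  induction f with
  | zero => intro b; simp [pvBloop]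
  | succ f ih =>
    intro b
    by_cases h4 : 4 ≤ b
    · have h2 : PySem.Int.floordiv b 4 = b / 4 := PySem.Int.floordiv_eq_ediv_of_pos (by norm_num)
      simp only [pvBloop, if_pos h4]
      rw [pvBloop_acc]
      have hih := ih (PySem.Int.mod b 4 + PySem.Int.floordiv b 4)
      have h3 : 0 ≤ PySem.Int.floordiv b 4 := by rw [h2]; omega
      omega
    · simp [pvBloop, h4]

-- A's while-loop, characterised by B's count: total gate list and final counters
lemma pvAloop_eq (fA : Nat) : ∀ (b : Int), b.toNat ≤ fA → ∀ (fB : Nat), b.toNat ≤ fB →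
    ∀ (idx cidx : Int) (acc : List (List Int)),
    pvAloop fA b idx cidx acc =
      (acc ++ (List.range (pvBloop fB b 0).1.toNat).map (pvGate cidx idx),
       idx + (pvBloop fB b 0).1, (pvBloop fB b 0).2) := by
  induction fA with
  | zero =>
    intro b hb fB _ idx cidx acc
    have h4 : ¬ 4 ≤ b := by omega
    rw [pvBloop_stop _ _ h4]
    simp [pvAloop]
  | succ fA ih =>
    intro b hb fB hbB idx cidx acc
    by_cases h4 : 4 ≤ b
    · have h1 : PySem.Int.mod b 4 = b % 4 := PySem.Int.mod_eq_emod_of_pos (by norm_num)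
      have h2 : PySem.Int.floordiv b 4 = b / 4 := PySem.Int.floordiv_eq_ediv_of_pos (by norm_num)
      obtain ⟨fB', rfl⟩ : ∃ fB', fB = fB' + 1 := ⟨fB - 1, by omega⟩
      have himpl : 0 ≤ PySem.Int.floordiv b 4 := by rw [h2]; omega
      have hrecA : (PySem.Int.mod b 4 + PySem.Int.floordiv b 4).toNat ≤ fA := by
        rw [h1, h2]; omega
      have hrecB : (PySem.Int.mod b 4 + PySem.Int.floordiv b 4).toNat ≤ fB' := by
        rw [h1, h2]; omega
      have hlen : (PySem.List.pyRange 0 (PySem.Int.floordiv b 4) 1).length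
          = (PySem.Int.floordiv b 4).toNat := by
        rw [PySem.List.length_pyRange_one]; omega
      simp only [pvAloop, if_pos h4]
      rw [pvFold_eq, hlen]
      simp only
      rw [ih _ hrecA _ hrecB]
      have hB : pvBloop (fB' + 1) b 0
          = ((pvBloop fB' (PySem.Int.mod b 4 + PySem.Int.floordiv b 4) 0).1 + PySem.Int.floordiv b 4,
             (pvBloop fB' (PySem.Int.mod b 4 + PySem.Int.floordiv b 4) 0).2) := by
        simp only [pvBloop, if_pos h4]
        rw [pvBloop_acc]
        simp
      have hG' : 0 ≤ (pvBloop fB' (PySem.Int.mod b 4 + PySem.Int.floordiv b 4) 0).1 :=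
        pvBloop_nonneg _ _
      refine congrArg₂ _ ?_ (by rw [hB]; simp [Prod.ext_iff]; omega)
      rw [hB]
      simp only [List.append_assoc]
      congr 1
      have htn : ((pvBloop fB' (PySem.Int.mod b 4 + PySem.Int.floordiv b 4) 0).1 + PySem.Int.floordiv b 4).toNat
          = (PySem.Int.floordiv b 4).toNat
            + (pvBloop fB' (PySem.Int.mod b 4 + PySem.Int.floordiv b 4) 0).1.toNat := by omega
      rw [htn, List.range_add, List.map_append, List.map_map]
      congr 1
      apply List.map_congr_left
      intro k _
      simp only [pvGate, Function.comp_apply, List.cons.injEq, and_true, true_and]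
      push_cast
      have hc : ((PySem.Int.floordiv b 4).toNat : Int) = PySem.Int.floordiv b 4 := by omega
      rw [hc]
      omega
    · rw [pvBloop_stop _ _ h4]
      simp [pvAloop, h4]

-- ===== VERDICT (by name: the statement is the Claim_ definition above) =====
theorem getDecomposeArray_spec : Claim_equal_getDecomposeArray := by
  intro n _
  unfold Spec_getDecomposeArray getDecomposeArray getDecomposeArray_alt
  rw [pvAloop_eq _ _ le_rfl _ le_rfl]
  have hG := pvBloop_nonneg n.toNat n
  have hmap : (PySem.List.pyRange 0 (pvBloop n.toNat n 0).1 1).map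
      (fun k => [4, 4 * k, 4 * k + 1, 4 * k + 2, 4 * k + 3, n + k])
      = (List.range (pvBloop n.toNat n 0).1.toNat).map (pvGate 0 n) := by
    rw [PySem.List.pyRange_one, List.map_map]
    have hz : ((pvBloop n.toNat n 0).1 - 0).toNat = (pvBloop n.toNat n 0).1.toNat := by omega
    rw [hz]
    apply List.map_congr_left
    intro k _
    simp only [pvGate, Function.comp_apply, List.cons.injEq, and_true, true_and]
    omega
  simp only [hmap, List.nil_append]
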